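-- pv_equiv track=rewrite | github.com/andrewjleung/gtci | src/13-top-k-elements/ch01_rearrange_string_k_distance_apart.py | rearrange_string_k_distance_apart
-- ===== SOURCE A (Python) =====
-- from heapq import (heappush, heappop)
-- from collections import deque
--
-- def rearrange_string_k_distance_apart(string, k):
--     """
--     Time Complexity:  O(n * log n)
--     Space Complexity: O(n)
--     """
--     if k <= 1:
--         return string
--
--     # Get the frequencies of every character.
--     frequencies = {}
--     for char in string:  # O(n)
--         frequencies[char] = frequencies.get(char, 0) + 1
--
--     # Add all characters to a max heap based upon frequency.
--     max_heap = []  # Characters that can be placed.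
--     for char, freq in frequencies.items():  # O(n * log n)
--         heappush(max_heap, (-freq, char))
--
--     # While the max heap is not empty:
--     #   Add the character with the most remaining occurrences to the result, and
--     #   then add that character to a min heap based upon the index where it was
--     #   just placed. This will be used to keep track of characters that can't
--     #   yet be placed.
--
--     #   Add all previously placed characters which can now be placed again back
--     #   to the max heap.
--
--     result = []
--     cant_place = deque()  # Characters that can't yet be placed.
--     while len(max_heap) > 0:  # O(n * log n)
--         neg_freq, char = heappop(max_heap)
--         result.append(char)
--         cant_place.append((char, neg_freq + 1))
--
--         # In order for the length of `cant_place` to be comparable to `k`, we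
--         # need to place ALL characters that we've just placed into it,
--         # regardless of if they actually can be placed again. Otherwise, we need
--         # to keep track of the exact index each element was placed.
--         if len(cant_place) == k:
--             char, neg_freq = cant_place.popleft()
--
--             # If the character can't be placed again, don't put it back in the
--             # heap.
--             if -neg_freq > 0:
--                 heappush(max_heap, (neg_freq, char))
--
--     # We are always pushing regardless of frequency to the cant_place queue.
--     # We can't trust that it being non-empty implies that we couldn't place all
--     # characters. I don't love this, but it's necessary.
--     if len(result) != len(string):
--         return ''
--
--     return ''.join(result)
-- ===== SOURCE B (Python) =====
-- def rearrange_string_k_distance_apart(string, k):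
--     """Greedy fill without heap/deque: per-char remaining counts and a
--     last-placed position with an exactly-k cooldown."""
--     if k <= 1:
--         return string
--
--     counts = {}
--     for ch in string:
--         counts[ch] = counts.get(ch, 0) + 1
--
--     last = {}
--     out = []
--     for i in range(len(string)):
--         best = None   # (char, remaining) of the current best candidate
--         for ch, cnt in counts.items():
--             if cnt > 0 and i - last.get(ch, -k) >= k:
--                 if best is None or cnt > best[1] or (cnt == best[1] and ch < best[0]):
--                     best = (ch, cnt)
--         if best is None:
--             break
--         out.append(best[0])
--         counts[best[0]] = best[1] - 1
--         last[best[0]] = i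
--
--     if len(out) != len(string):
--         return ''
--     return ''.join(out)
-- ===== Notes on version B (the rewrite author's own statement) =====
-- stated objective: simpler
-- what changed: Replaces the max-heap plus fixed-length deque cooldown machinery with a direct greedy fill: per-character remaining counts and a last-placed position, scanning at each output position for the eligible character (cooldown >= k) with the largest remaining count, smallest character on ties.
import Mathlib
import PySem

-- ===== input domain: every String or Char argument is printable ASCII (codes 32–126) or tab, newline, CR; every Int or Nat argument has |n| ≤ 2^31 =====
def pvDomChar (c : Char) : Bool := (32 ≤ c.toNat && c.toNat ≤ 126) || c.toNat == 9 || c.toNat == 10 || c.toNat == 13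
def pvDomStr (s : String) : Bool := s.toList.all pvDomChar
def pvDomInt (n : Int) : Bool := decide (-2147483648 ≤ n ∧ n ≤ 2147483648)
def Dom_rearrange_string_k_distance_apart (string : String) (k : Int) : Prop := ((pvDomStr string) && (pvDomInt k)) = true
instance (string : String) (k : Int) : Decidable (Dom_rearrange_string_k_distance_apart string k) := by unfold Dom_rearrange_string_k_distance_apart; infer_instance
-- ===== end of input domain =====

-- B replaces A's max-heap + fixed-length deque cooldown with a direct greedy fill
-- (remaining count + last-placed position per character); objective: simpler.

-- ===== PORT A =====
-- heapq's heap ADT modelled as a list kept sorted ascending in (neg_freq, char):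
-- heappush = sorted insertion, heappop = take the head (the minimum) — exact heap semantics
-- (no two entries are ever equal here, so pop order is exactly heapq's).
def pvHeapInsert (x : Int × Char) : List (Int × Char) → List (Int × Char)
  | [] => [x]
  | y :: t => if x.1 < y.1 ∨ (x.1 = y.1 ∧ x.2 < y.2) then x :: y :: t else y :: pvHeapInsert x t

-- the `while len(max_heap) > 0` loop; fuel = len(string) bounds the iteration count
-- (each iteration consumes one remaining occurrence, so the loop runs at most len(string) times).
def pvLoopA (k : Int) : Nat → List (Int × Char) → List (Char × Int) → List Char → List Char
  | 0, _, _, res => res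
  | _ + 1, [], _, res => res
  | f + 1, (nf, c) :: rest, cant_place, res =>
      if (((cant_place ++ [(c, nf + 1)]).length : Nat) : Int) = k then
        match cant_place ++ [(c, nf + 1)] with
        | [] => res ++ [c]
        | (c2, nf2) :: crest =>
            if 0 < -nf2 then pvLoopA k f (pvHeapInsert (nf2, c2) rest) crest (res ++ [c])
            else pvLoopA k f rest crest (res ++ [c])
      else pvLoopA k f rest (cant_place ++ [(c, nf + 1)]) (res ++ [c])

def rearrange_string_k_distance_apart (string : String) (k : Int) : String :=
  if k ≤ 1 then string
  else
    let chars := string.toList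
    let frequencies := chars.foldl (fun d ch => d.insert ch (d.getD ch 0 + 1))
      (PySem.Dict.empty : PySem.Dict Char Int)
    let max_heap := frequencies.items.foldl (fun h p => pvHeapInsert (-p.2, p.1) h) []
    let res := pvLoopA k chars.length max_heap [] []
    if res.length ≠ chars.length then "" else String.ofList res

-- ===== PORT B =====
-- Source B's inner scan: fold over counts.items() keeping the best (char, cnt) candidate
def pvBestStep (last : PySem.Dict Char Int) (i k : Int)
    (best : Option (Char × Int)) (p : Char × Int) : Option (Char × Int) :=
  if 0 < p.2 ∧ k ≤ i - last.getD p.1 (-k) then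
    match best with
    | none => some p
    | some q => if q.2 < p.2 ∨ (p.2 = q.2 ∧ p.1 < q.1) then some p else some q
  else best

-- Source B's `for i in range(len(string))` loop with its `break`
def pvLoopB (k : Int) : Nat → Int → PySem.Dict Char Int → PySem.Dict Char Int → List Char → List Char
  | 0, _, _, _, out => out
  | f + 1, i, counts, last, out =>
      match counts.items.foldl (pvBestStep last i k) none with
      | none => out
      | some (c, cnt) =>
          pvLoopB k f (i + 1) (counts.insert c (cnt - 1)) (last.insert c i) (out ++ [c])

def rearrange_string_k_distance_apart_alt (string : String) (k : Int) : String :=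
  if k ≤ 1 then string
  else
    let chars := string.toList
    let counts := chars.foldl (fun d ch => d.insert ch (d.getD ch 0 + 1))
      (PySem.Dict.empty : PySem.Dict Char Int)
    let out := pvLoopB k chars.length 0 counts PySem.Dict.empty []
    if out.length ≠ chars.length then "" else String.ofList out

-- ===== PRECONDITION & SPEC =====
def Spec_rearrange_string_k_distance_apart (string : String) (k : Int) (out : String) : Prop := out = rearrange_string_k_distance_apart_alt string k
instance (string : String) (k : Int) (out : String) : Decidable (Spec_rearrange_string_k_distance_apart string k out) := by unfold Spec_rearrange_string_k_distance_apart; infer_instance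

-- ===== CLAIM (what is proved, stated in full; the proofs are below) =====
def Claim_equal_rearrange_string_k_distance_apart : Prop := ∀ (string : String) (k : Int), Dom_rearrange_string_k_distance_apart string k → Spec_rearrange_string_k_distance_apart string k (rearrange_string_k_distance_apart string k)

-- ===== LEMMAS AND PROOFS =====

-- quality key of a candidate (c, cnt): smaller key = picked first, matching heapq's (-freq, char)
def pvKey (p : Char × Int) : Lex (Int × Char) := toLex (-p.2, p.1)

-- eligibility test of Source B's inner scan
def pvPred (last : PySem.Dict Char Int) (i k : Int) (p : Char × Int) : Prop :=
  0 < p.2 ∧ k ≤ i - last.getD p.1 (-k)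

lemma pvKey_lt_iff (p q : Char × Int) :
    pvKey p < pvKey q ↔ q.2 < p.2 ∨ (p.2 = q.2 ∧ p.1 < q.1) := by
  unfold pvKey
  rw [Prod.Lex.lt_iff]
  simp only [ofLex_toLex]
  constructor
  · rintro (h | ⟨h1, h2⟩)
    · exact Or.inl (by omega)
    · exact Or.inr ⟨by omega, h2⟩
  · rintro (h | ⟨h1, h2⟩)
    · exact Or.inl (by omega)
    · exact Or.inr ⟨by omega, h2⟩

-- strict ordering on heap entries, as written in pvHeapInsert
def pvHeapLt (x y : Int × Char) : Prop := x.1 < y.1 ∨ (x.1 = y.1 ∧ x.2 < y.2)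

lemma pvHeapLt_iff (x y : Int × Char) : pvHeapLt x y ↔ toLex x < toLex y := by
  rw [Prod.Lex.lt_iff]; simp only [ofLex_toLex]; rfl

lemma pvHeapLt_trans {a b c : Int × Char} (h1 : pvHeapLt a b) (h2 : pvHeapLt b c) :
    pvHeapLt a c := by
  rw [pvHeapLt_iff] at *
  exact lt_trans h1 h2

lemma pv_toLex_ne {x y : Int × Char} (h : x ≠ y) : toLex x ≠ toLex y := by
  intro hc
  apply h
  have := congrArg ofLex hc
  simpa using this

lemma pvHeapLt_of_not_of_ne {a b : Int × Char} (h : ¬ pvHeapLt a b) (hne : a ≠ b) :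
    pvHeapLt b a := by
  rw [pvHeapLt_iff] at *
  exact lt_of_le_of_ne (not_lt.mp h) (pv_toLex_ne (fun hc => hne hc.symm))

lemma mem_pvHeapInsert (x z : Int × Char) (l : List (Int × Char)) :
    z ∈ pvHeapInsert x l ↔ z = x ∨ z ∈ l := by
  induction l with
  | nil => simp [pvHeapInsert]
  | cons y t ih =>
      by_cases h : x.1 < y.1 ∨ (x.1 = y.1 ∧ x.2 < y.2)
      · simp only [pvHeapInsert, if_pos h, List.mem_cons]
      · simp only [pvHeapInsert, if_neg h, List.mem_cons, ih]
        tauto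

lemma pairwise_pvHeapInsert (x : Int × Char) (l : List (Int × Char))
    (hl : l.Pairwise pvHeapLt) (hx : ∀ y ∈ l, x ≠ y) :
    (pvHeapInsert x l).Pairwise pvHeapLt := by
  induction l with
  | nil => simp [pvHeapInsert]
  | cons y t ih =>
      rw [List.pairwise_cons] at hl
      rw [pvHeapInsert]
      by_cases h : x.1 < y.1 ∨ (x.1 = y.1 ∧ x.2 < y.2)
      · rw [if_pos h]
        refine List.pairwise_cons.mpr ⟨?_, List.pairwise_cons.mpr hl⟩
        intro z hz
        rcases List.mem_cons.mp hz with hzy | hz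
        · rw [hzy]; exact h
        · exact pvHeapLt_trans h (hl.1 z hz)
      · rw [if_neg h]
        refine List.pairwise_cons.mpr
          ⟨?_, ih hl.2 (fun z hz => hx z (List.mem_cons_of_mem _ hz))⟩
        intro z hz
        rcases (mem_pvHeapInsert x z t).mp hz with hzx | hz
        · rw [hzx]
          exact pvHeapLt_of_not_of_ne h (hx y (List.mem_cons_self))
        · exact hl.1 z hz

-- characterisation of Source B's inner foldl scan: a `none` result means no eligible item,
-- a `some q` result is an eligible item (or the seed) of minimal pvKey
lemma pvBest_spec (last : PySem.Dict Char Int) (i k : Int) :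
    ∀ (l : List (Char × Int)) (acc : Option (Char × Int)),
      (l.foldl (pvBestStep last i k) acc = none →
        acc = none ∧ ∀ p ∈ l, ¬ pvPred last i k p) ∧
      (∀ q, l.foldl (pvBestStep last i k) acc = some q →
        ((q ∈ l ∧ pvPred last i k q) ∨ acc = some q) ∧
        (∀ p ∈ l, pvPred last i k p → pvKey q ≤ pvKey p) ∧
        (∀ a, acc = some a → pvKey q ≤ pvKey a)) := by
  intro l
  induction l with
  | nil =>
      intro acc
      refine ⟨fun h => ⟨h, by simp⟩, fun q h => ?_⟩
      simp only [List.foldl_nil] at h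
      exact ⟨Or.inr h, by simp, fun a ha => by rw [h] at ha; cases ha; exact le_refl _⟩
  | cons p0 l ih =>
      intro acc
      have hstep_none : pvBestStep last i k acc p0 = none →
          acc = none ∧ ¬ pvPred last i k p0 := by
        intro h
        unfold pvBestStep at h
        by_cases hp : 0 < p0.2 ∧ k ≤ i - last.getD p0.1 (-k)
        · rw [if_pos hp] at h
          cases acc with
          | none => simp at h
          | some a =>
              by_cases hb : a.2 < p0.2 ∨ (p0.2 = a.2 ∧ p0.1 < a.1) <;> simp [hb] at h
        · rw [if_neg hp] at h
          exact ⟨h, fun hc => hp hc⟩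
      have hstep_some : ∀ m, pvBestStep last i k acc p0 = some m →
          ((m = p0 ∧ pvPred last i k p0) ∨ acc = some m) ∧
          (pvPred last i k p0 → pvKey m ≤ pvKey p0) ∧
          (∀ a, acc = some a → pvKey m ≤ pvKey a) := by
        intro m h
        unfold pvBestStep at h
        by_cases hp : 0 < p0.2 ∧ k ≤ i - last.getD p0.1 (-k)
        · rw [if_pos hp] at h
          cases acc with
          | none =>
              simp only [Option.some.injEq] at h
              subst h
              exact ⟨Or.inl ⟨rfl, hp⟩, fun _ => le_refl _, by simp⟩
          | some a =>
              change (if a.2 < p0.2 ∨ (p0.2 = a.2 ∧ p0.1 < a.1) then some p0 else some a)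
                = some m at h
              by_cases hb : a.2 < p0.2 ∨ (p0.2 = a.2 ∧ p0.1 < a.1)
              · rw [if_pos hb] at h
                simp only [Option.some.injEq] at h
                subst h
                have hlt : pvKey p0 < pvKey a := (pvKey_lt_iff p0 a).mpr hb
                exact ⟨Or.inl ⟨rfl, hp⟩, fun _ => le_refl _,
                  fun a' ha' => by cases ha'; exact le_of_lt hlt⟩
              · rw [if_neg hb] at h
                simp only [Option.some.injEq] at h
                subst h
                have hnlt : ¬ pvKey p0 < pvKey a := fun hc => hb ((pvKey_lt_iff p0 a).mp hc)
                exact ⟨Or.inr rfl, fun _ => not_lt.mp hnlt,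
                  fun a' ha' => by cases ha'; exact le_refl _⟩
        · rw [if_neg hp] at h
          exact ⟨Or.inr h, fun hpred => absurd hpred hp,
            fun a ha => by rw [h] at ha; cases ha; exact le_refl _⟩
      constructor
      · intro hnone
        rw [List.foldl_cons] at hnone
        obtain ⟨h1, h2⟩ := (ih (pvBestStep last i k acc p0)).1 hnone
        obtain ⟨ha, hp0⟩ := hstep_none h1
        refine ⟨ha, fun p hp => ?_⟩
        rcases List.mem_cons.mp hp with hpe | hpl
        · rw [hpe]; exact hp0
        · exact h2 p hpl
      · intro q hq
        rw [List.foldl_cons] at hq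
        obtain ⟨hmem', hmax', hacc'⟩ := (ih (pvBestStep last i k acc p0)).2 q hq
        refine ⟨?_, ?_, ?_⟩
        · rcases hmem' with ⟨hql, hqp⟩ | hacc
          · exact Or.inl ⟨List.mem_cons_of_mem _ hql, hqp⟩
          · obtain ⟨hm, _, _⟩ := hstep_some q hacc
            rcases hm with ⟨hqe, hp0⟩ | h
            · exact Or.inl ⟨by rw [hqe]; exact List.mem_cons_self, by rw [hqe]; exact hp0⟩
            · exact Or.inr h
        · intro p hp hpred
          rcases List.mem_cons.mp hp with hpe | hpl
          · cases hstep : pvBestStep last i k acc p0 with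
            | none =>
                exact absurd (hpe ▸ hpred) (hstep_none hstep).2
            | some m =>
                have h1 := (hstep_some m hstep).2.1 (hpe ▸ hpred)
                have h2 := hacc' m hstep
                calc pvKey q ≤ pvKey m := h2
                  _ ≤ pvKey p0 := h1
                  _ = pvKey p := by rw [hpe]
          · exact hmax' p hpl hpred
        · intro a ha
          cases hstep : pvBestStep last i k acc p0 with
          | none =>
              obtain ⟨h1, _⟩ := hstep_none hstep
              rw [ha] at h1; cases h1
          | some m =>
              obtain ⟨_, _, h3⟩ := hstep_some m hstep
              exact le_trans (hacc' m hstep) (h3 a ha)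

-- any positive-valued key occurs in the items list
lemma pv_mem_items_of_getD_pos (d : PySem.Dict Char Int) (c : Char)
    (h : 0 < d.getD c 0) : (c, d.getD c 0) ∈ d.items := by
  cases hc : d.contains c with
  | false =>
      rw [PySem.Dict.getD_of_not_contains d 0 hc] at h
      omega
  | true =>
      have hiso := PySem.Dict.contains_eq_isSome_get? d c
      rw [hc] at hiso
      cases hg : d.get? c with
      | none => rw [hg] at hiso; simp at hiso
      | some w =>
          rw [PySem.Dict.getD_of_get?_eq_some d 0 hg]
          exact PySem.Dict.mem_items_of_get?_eq_some d hg

-- the invariant tying A's loop state (heap, cant_place) to B's loop state (counts, last)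
-- at the start of the iteration placing position i
structure PvInv (k i : Int) (heap : List (Int × Char)) (cant : List (Char × Int))
    (counts last : PySem.Dict Char Int) : Prop where
  hk : 2 ≤ k
  hi : 0 ≤ i
  cnodup : counts.keys.Nodup
  clen : (cant.length : Int) = min i (k - 1)
  cpos : ∀ (j : Nat) (hj : j < cant.length),
    last.getD (cant[j].1) (-k) = i - (cant.length : Int) + (j : Int)
  cmem : ∀ c : Char, i - last.getD c (-k) < k → c ∈ cant.map Prod.fst
  cval : ∀ p ∈ cant, p.2 = -(counts.getD p.1 0)
  hsort : heap.Pairwise pvHeapLt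
  hmem : ∀ (v : Int) (c : Char), (v, c) ∈ heap ↔
    (0 < counts.getD c 0 ∧ k ≤ i - last.getD c (-k) ∧ v = -(counts.getD c 0))

-- entries of the items list of a nodup-keyed dict carry the getD value
lemma pv_items_val (d : PySem.Dict Char Int) (hn : d.keys.Nodup)
    {p : Char × Int} (hp : p ∈ d.items) : p.2 = d.getD p.1 0 := by
  have hp' : (p.1, p.2) ∈ d.items := by simpa using hp
  exact (PySem.Dict.getD_of_mem_items d hp' hn 0).symm

-- the head character of A's heap is not in the cooldown queue
lemma pv_head_not_in_cant {k i v : Int} {c : Char} {rest : List (Int × Char)}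
    {cant : List (Char × Int)} {counts last : PySem.Dict Char Int}
    (inv : PvInv k i ((v, c) :: rest) cant counts last) :
    c ∉ cant.map Prod.fst := by
  obtain ⟨_, helig, _⟩ := (inv.hmem v c).mp List.mem_cons_self
  intro hmemc
  obtain ⟨p, hp, hpc⟩ := List.mem_map.mp hmemc
  obtain ⟨j, hj, hje⟩ := List.mem_iff_getElem.mp hp
  have hcp := inv.cpos j hj
  rw [hje, hpc] at hcp
  have hclen := inv.clen
  have hj' : (j : Int) < (cant.length : Int) := by exact_mod_cast hj
  have hk := inv.hk
  omega

-- the head entry of A's heap does not occur again in its tail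
lemma pv_head_not_in_rest {k i v : Int} {c : Char} {rest : List (Int × Char)}
    {cant : List (Char × Int)} {counts last : PySem.Dict Char Int}
    (inv : PvInv k i ((v, c) :: rest) cant counts last) :
    ∀ v' : Int, (v', c) ∉ rest := by
  obtain ⟨_, _, hveq⟩ := (inv.hmem v c).mp List.mem_cons_self
  intro v' hmem
  obtain ⟨_, _, hveq'⟩ := (inv.hmem v' c).mp (List.mem_cons_of_mem _ hmem)
  have hvv : v' = v := by omega
  subst hvv
  have hp := (List.pairwise_cons.mp inv.hsort).1 (v', c) hmem
  rcases hp with h | ⟨_, h⟩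
  · omega
  · exact absurd h (lt_irrefl c)

-- Source B's scan selects exactly the head of A's heap (and finds nothing iff the heap is empty)
lemma pv_pick_none {k i : Int} {cant : List (Char × Int)}
    {counts last : PySem.Dict Char Int}
    (inv : PvInv k i [] cant counts last) :
    counts.items.foldl (pvBestStep last i k) none = none := by
  cases hfold : counts.items.foldl (pvBestStep last i k) none with
  | none => rfl
  | some q =>
      obtain ⟨hmem', _, _⟩ := (pvBest_spec last i k counts.items none).2 q hfold
      rcases hmem' with ⟨hqi, hqp⟩ | habs
      · have hq2 := pv_items_val counts inv.cnodup hqi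
        unfold pvPred at hqp
        obtain ⟨hqp1, hqp2⟩ := hqp
        have : ((-q.2 : Int), q.1) ∈ ([] : List (Int × Char)) := by
          rw [inv.hmem]
          exact ⟨by omega, hqp2, by omega⟩
        simp at this
      · cases habs

lemma pv_pick_some {k i v : Int} {c : Char} {rest : List (Int × Char)}
    {cant : List (Char × Int)} {counts last : PySem.Dict Char Int}
    (inv : PvInv k i ((v, c) :: rest) cant counts last) :
    counts.items.foldl (pvBestStep last i k) none = some (c, counts.getD c 0) := by
  obtain ⟨hpos, helig, hveq⟩ := (inv.hmem v c).mp List.mem_cons_self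
  have hitems : (c, counts.getD c 0) ∈ counts.items := pv_mem_items_of_getD_pos counts c hpos
  have hpredc : pvPred last i k (c, counts.getD c 0) := ⟨hpos, helig⟩
  cases hfold : counts.items.foldl (pvBestStep last i k) none with
  | none =>
      have := ((pvBest_spec last i k counts.items none).1 hfold).2 _ hitems
      exact absurd hpredc this
  | some q =>
      obtain ⟨hmemq, hmax, _⟩ := (pvBest_spec last i k counts.items none).2 q hfold
      rcases hmemq with ⟨hqi, hqp⟩ | habs
      swap
      · cases habs
      have hq2 := pv_items_val counts inv.cnodup hqi
      unfold pvPred at hqp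
      obtain ⟨hqp1, hqp2⟩ := hqp
      have hqheap : ((-q.2 : Int), q.1) ∈ (v, c) :: rest := by
        rw [inv.hmem]
        exact ⟨by omega, hqp2, by omega⟩
      rcases List.mem_cons.mp hqheap with heq | hmem2
      · have h1 : q.1 = c := congrArg Prod.snd heq
        have h2 : -q.2 = v := congrArg Prod.fst heq
        have : q = (c, counts.getD c 0) := by
          rw [Prod.ext_iff]
          exact ⟨h1, by omega⟩
        rw [this]
      · exfalso
        have hlt := (List.pairwise_cons.mp inv.hsort).1 _ hmem2
        rw [pvHeapLt_iff] at hlt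
        have hle := hmax (c, counts.getD c 0) hitems hpredc
        have hkeyc : pvKey (c, counts.getD c 0) = toLex ((v : Int), c) := by
          unfold pvKey
          rw [show v = -(counts.getD c 0) from hveq]
        have hkeyq : pvKey q = toLex ((-q.2 : Int), q.1) := rfl
        rw [hkeyc, hkeyq] at hle
        exact absurd (lt_of_lt_of_le hlt hle) (lt_irrefl _)

-- invariant preservation: placing c with no release from the cooldown queue
lemma pv_step_inv_norelease (k i v : Int) (c : Char) (rest : List (Int × Char))
    (cant : List (Char × Int)) (counts last : PySem.Dict Char Int)
    (inv : PvInv k i ((v, c) :: rest) cant counts last)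
    (hnrel : (((cant ++ [(c, v + 1)]).length : Nat) : Int) ≠ k) :
    PvInv k (i + 1) rest (cant ++ [(c, v + 1)])
      (counts.insert c (counts.getD c 0 - 1)) (last.insert c i) := by
  obtain ⟨hpos, helig, hveq⟩ := (inv.hmem v c).mp List.mem_cons_self
  have hk := inv.hk
  have hi := inv.hi
  have hclen := inv.clen
  have hF1 := pv_head_not_in_cant inv
  have hF2 := pv_head_not_in_rest inv
  have hnrel' : ((cant.length : Int) + 1) ≠ k := by
    simp only [List.length_append, List.length_cons, List.length_nil] at hnrel
    push_cast at hnrel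
    omega
  have hdle : (cant.length : Int) ≤ k - 2 := by omega
  have hile : i < k - 1 := by omega
  refine ⟨by omega, by omega, PySem.Dict.nodup_keys_insert counts c _ inv.cnodup, ?_, ?_, ?_, ?_, ?_, ?_⟩
  · simp only [List.length_append, List.length_cons, List.length_nil]
    push_cast
    omega
  · intro j hj
    rw [List.length_append] at hj ⊢
    simp only [List.length_cons, List.length_nil] at hj ⊢
    by_cases hj2 : j < cant.length
    · rw [List.getElem_append_left hj2]
      have hne : cant[j].1 ≠ c := by
        intro hc
        exact hF1 (List.mem_map.mpr ⟨cant[j], List.getElem_mem hj2, hc⟩)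
      rw [PySem.Dict.getD_insert, if_neg hne]
      have hcp := inv.cpos j hj2
      push_cast
      omega
    · have hj3 : j = cant.length := by omega
      have hget : (cant ++ [(c, v + 1)])[j] = (c, v + 1) := by
        apply List.getElem_concat_length hj3
      rw [hget]
      simp only []
      rw [PySem.Dict.getD_insert, if_pos rfl]
      push_cast
      omega
  · intro x hx
    rw [PySem.Dict.getD_insert] at hx
    by_cases hxc : x = c
    · rw [List.map_append]
      exact List.mem_append_right _ (by simp [hxc])
    · rw [if_neg hxc] at hx
      have := inv.cmem x (by omega)
      rw [List.map_append]
      exact List.mem_append_left _ this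
  · intro p hp
    rcases List.mem_append.mp hp with hp1 | hp2
    · have hne : p.1 ≠ c := by
        intro hc
        exact hF1 (List.mem_map.mpr ⟨p, hp1, hc⟩)
      rw [PySem.Dict.getD_insert, if_neg hne]
      exact inv.cval p hp1
    · have hpe : p = (c, v + 1) := by simpa using hp2
      rw [hpe]
      simp only []
      rw [PySem.Dict.getD_insert, if_pos rfl]
      omega
  · exact (List.pairwise_cons.mp inv.hsort).2
  · intro v' x
    rw [PySem.Dict.getD_insert, PySem.Dict.getD_insert]
    by_cases hxc : x = c
    · rw [if_pos hxc, if_pos hxc]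
      constructor
      · intro hmem'
        exact absurd (hxc ▸ hmem') (hF2 v')
      · rintro ⟨_, h2, _⟩
        omega
    · rw [if_neg hxc, if_neg hxc]
      have hmemiff : (v', x) ∈ rest ↔ (v', x) ∈ (v, c) :: rest := by
        constructor
        · exact List.mem_cons_of_mem _
        · intro h
          rcases List.mem_cons.mp h with he | h
          · exact absurd (congrArg Prod.snd he) hxc
          · exact h
      rw [hmemiff, inv.hmem v' x]
      constructor
      · rintro ⟨h1, h2, h3⟩
        exact ⟨h1, by omega, h3⟩
      · rintro ⟨h1, h2, h3⟩
        refine ⟨h1, ?_, h3⟩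
        by_contra hlt
        rw [not_le] at hlt
        have hx := inv.cmem x (by omega)
        obtain ⟨p, hp, hpc⟩ := List.mem_map.mp hx
        obtain ⟨j, hj, hje⟩ := List.mem_iff_getElem.mp hp
        have hcp := inv.cpos j hj
        rw [hje, hpc] at hcp
        have hj' : (j : Int) < (cant.length : Int) := by exact_mod_cast hj
        omega

-- invariant preservation: placing c and releasing the front of the cooldown queue
lemma pv_step_inv_release (k i v : Int) (c c2 : Char) (nf2 : Int)
    (rest : List (Int × Char)) (ctl : List (Char × Int))
    (counts last : PySem.Dict Char Int)
    (inv : PvInv k i ((v, c) :: rest) ((c2, nf2) :: ctl) counts last)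
    (hrel : ((((c2, nf2) :: ctl ++ [(c, v + 1)]).length : Nat) : Int) = k) :
    PvInv k (i + 1) (if 0 < -nf2 then pvHeapInsert (nf2, c2) rest else rest)
      (ctl ++ [(c, v + 1)])
      (counts.insert c (counts.getD c 0 - 1)) (last.insert c i) := by
  obtain ⟨hpos, helig, hveq⟩ := (inv.hmem v c).mp List.mem_cons_self
  have hk := inv.hk
  have hi := inv.hi
  have hclen := inv.clen
  have hF1 := pv_head_not_in_cant inv
  have hF2 := pv_head_not_in_rest inv
  have hrel' : ((ctl.length : Int) + 2) = k := by
    simp only [List.length_append, List.length_cons, List.length_nil] at hrel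
    push_cast at hrel
    omega
  have hclen' : ((ctl.length : Int) + 1) = min i (k - 1) := by
    simpa using hclen
  have hik : k - 1 ≤ i := by omega
  -- last position of the released character c2
  have hF3 : last.getD c2 (-k) = i - (k - 1) := by
    have hcp := inv.cpos 0 (by simp)
    simp only [List.getElem_cons_zero] at hcp
    simp only [List.length_cons] at hcp
    push_cast at hcp
    omega
  have hF4 : nf2 = -(counts.getD c2 0) := inv.cval (c2, nf2) List.mem_cons_self
  have hF5 : c2 ≠ c := by
    intro hc
    exact hF1 (by simp [← hc])
  have hF6 : ∀ w : Int, (w, c2) ∉ rest := by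
    intro w hw
    obtain ⟨_, h2, _⟩ := (inv.hmem w c2).mp (List.mem_cons_of_mem _ hw)
    omega
  -- characters still cooling have a recent last position
  have hF7 : ∀ x ∈ ctl.map Prod.fst, i - last.getD x (-k) ≤ k - 2 := by
    intro x hx
    obtain ⟨p, hp, hpc⟩ := List.mem_map.mp hx
    obtain ⟨j, hj, hje⟩ := List.mem_iff_getElem.mp hp
    have hj1 : j + 1 < ((c2, nf2) :: ctl).length := by simpa using Nat.succ_lt_succ hj
    have hcp := inv.cpos (j + 1) hj1
    rw [List.getElem_cons_succ, hje, hpc] at hcp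
    simp only [List.length_cons] at hcp
    push_cast at hcp
    omega
  have hcnodup' := PySem.Dict.nodup_keys_insert counts c (counts.getD c 0 - 1) inv.cnodup
  refine ⟨by omega, by omega, hcnodup', ?_, ?_, ?_, ?_, ?_, ?_⟩
  · simp only [List.length_append, List.length_cons, List.length_nil]
    push_cast
    omega
  · intro j hj
    rw [List.length_append] at hj ⊢
    simp only [List.length_cons, List.length_nil] at hj ⊢
    by_cases hj2 : j < ctl.length
    · rw [List.getElem_append_left hj2]
      have hmemc : ctl[j].1 ∈ ((c2, nf2) :: ctl).map Prod.fst := by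
        simp only [List.map_cons, List.mem_cons]
        exact Or.inr (List.mem_map.mpr ⟨ctl[j], List.getElem_mem hj2, rfl⟩)
      have hne : ctl[j].1 ≠ c := by
        intro hc
        exact hF1 (hc ▸ hmemc)
      rw [PySem.Dict.getD_insert, if_neg hne]
      have hj1 : j + 1 < ((c2, nf2) :: ctl).length := by simpa using Nat.succ_lt_succ hj2
      have hcp := inv.cpos (j + 1) hj1
      rw [List.getElem_cons_succ] at hcp
      simp only [List.length_cons] at hcp
      push_cast at hcp ⊢
      omega
    · have hj3 : j = ctl.length := by omega
      have hget : (ctl ++ [(c, v + 1)])[j] = (c, v + 1) := by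
        apply List.getElem_concat_length hj3
      rw [hget]
      simp only []
      rw [PySem.Dict.getD_insert, if_pos rfl]
      push_cast
      omega
  · intro x hx
    rw [PySem.Dict.getD_insert] at hx
    by_cases hxc : x = c
    · rw [List.map_append]
      exact List.mem_append_right _ (by simp [hxc])
    · rw [if_neg hxc] at hx
      have hmemc := inv.cmem x (by omega)
      simp only [List.map_cons, List.mem_cons] at hmemc
      rcases hmemc with hxc2 | hxl
      · exfalso
        rw [hxc2] at hx
        omega
      · rw [List.map_append]
        exact List.mem_append_left _ hxl
  · intro p hp
    rcases List.mem_append.mp hp with hp1 | hp2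
    · have hmemc : p.1 ∈ ((c2, nf2) :: ctl).map Prod.fst := by
        simp only [List.map_cons, List.mem_cons]
        exact Or.inr (List.mem_map.mpr ⟨p, hp1, rfl⟩)
      have hne : p.1 ≠ c := by
        intro hc
        exact hF1 (hc ▸ hmemc)
      rw [PySem.Dict.getD_insert, if_neg hne]
      exact inv.cval p (List.mem_cons_of_mem _ hp1)
    · have hpe : p = (c, v + 1) := by simpa using hp2
      rw [hpe]
      simp only []
      rw [PySem.Dict.getD_insert, if_pos rfl]
      omega
  · have htail := (List.pairwise_cons.mp inv.hsort).2
    by_cases hpush : 0 < -nf2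
    · rw [if_pos hpush]
      refine pairwise_pvHeapInsert (nf2, c2) rest htail ?_
      intro y hy hc
      exact hF6 nf2 (hc ▸ hy)
    · rw [if_neg hpush]
      exact htail
  · intro v' x
    rw [PySem.Dict.getD_insert, PySem.Dict.getD_insert]
    by_cases hxc : x = c
    · rw [if_pos hxc, if_pos hxc]
      constructor
      · intro hmem'
        by_cases hpush : 0 < -nf2
        · rw [if_pos hpush] at hmem'
          rcases (mem_pvHeapInsert _ _ _).mp hmem' with he | hmem2
          · have hx2 : x = c2 := congrArg Prod.snd he
            exact (hF5 (by rw [← hx2]; exact hxc)).elim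
          · exact absurd (hxc ▸ hmem2) (hF2 v')
        · rw [if_neg hpush] at hmem'
          exact absurd (hxc ▸ hmem') (hF2 v')
      · rintro ⟨_, h2, _⟩
        omega
    · rw [if_neg hxc, if_neg hxc]
      by_cases hxc2 : x = c2
      · subst hxc2
        have hlast2 : last.getD x (-k) = i - (k - 1) := hF3
        constructor
        · intro hmem'
          by_cases hpush : 0 < -nf2
          · rw [if_pos hpush] at hmem'
            rcases (mem_pvHeapInsert _ _ _).mp hmem' with he | hmem2
            · have h1 : v' = nf2 := congrArg Prod.fst he
              exact ⟨by omega, by omega, by omega⟩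
            · exact absurd hmem2 (hF6 v')
          · rw [if_neg hpush] at hmem'
            exact absurd hmem' (hF6 v')
        · rintro ⟨h1, _, h3⟩
          have hpush : 0 < -nf2 := by omega
          rw [if_pos hpush]
          apply (mem_pvHeapInsert _ _ _).mpr
          exact Or.inl (by rw [Prod.ext_iff]; exact ⟨by omega, rfl⟩)
      · have hmemiff : (v', x) ∈ (v, c) :: rest ↔
            (v', x) ∈ (if 0 < -nf2 then pvHeapInsert (nf2, c2) rest else rest) := by
          constructor
          · intro h
            rcases List.mem_cons.mp h with he | h2
            · exact absurd (congrArg Prod.snd he) hxc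
            · by_cases hpush : 0 < -nf2
              · rw [if_pos hpush]
                exact (mem_pvHeapInsert _ _ _).mpr (Or.inr h2)
              · rw [if_neg hpush]
                exact h2
          · intro h
            by_cases hpush : 0 < -nf2
            · rw [if_pos hpush] at h
              rcases (mem_pvHeapInsert _ _ _).mp h with he | h2
              · exact absurd (congrArg Prod.snd he) hxc2
              · exact List.mem_cons_of_mem _ h2
            · rw [if_neg hpush] at h
              exact List.mem_cons_of_mem _ h
        rw [← hmemiff, inv.hmem v' x]
        constructor
        · rintro ⟨h1, h2, h3⟩
          exact ⟨h1, by omega, h3⟩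
        · rintro ⟨h1, h2, h3⟩
          refine ⟨h1, ?_, h3⟩
          by_contra hlt
          rw [not_le] at hlt
          have hmemc := inv.cmem x (by omega)
          simp only [List.map_cons, List.mem_cons] at hmemc
          rcases hmemc with hx2 | hxl
          · exact hxc2 hx2
          · have := hF7 x hxl
            omega

-- lockstep simulation: with the invariant, A's heap loop and B's scan loop compute
-- the same output list
lemma pv_loop_sim (k : Int) (f : Nat) :
    ∀ (i : Int) (heap : List (Int × Char)) (cant : List (Char × Int))
      (counts last : PySem.Dict Char Int) (out : List Char),
      PvInv k i heap cant counts last →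
      pvLoopA k f heap cant out = pvLoopB k f i counts last out := by
  induction f with
  | zero => intro i heap cant counts last out _; rfl
  | succ f ih =>
      intro i heap cant counts last out inv
      cases heap with
      | nil =>
          have hnone := pv_pick_none inv
          simp only [pvLoopA, pvLoopB, hnone]
      | cons hd rest =>
          obtain ⟨v, c⟩ := hd
          have hfold := pv_pick_some inv
          rw [show pvLoopB k (f + 1) i counts last out =
            (match counts.items.foldl (pvBestStep last i k) none with
              | none => out
              | some (c, cnt) =>
                  pvLoopB k f (i + 1) (counts.insert c (cnt - 1)) (last.insert c i)
                    (out ++ [c])) from rfl, hfold]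
          by_cases hrel : (((cant ++ [(c, v + 1)]).length : Nat) : Int) = k
          · cases cant with
            | nil =>
                exfalso
                simp at hrel
                have := inv.hk
                omega
            | cons hd2 ctl =>
                obtain ⟨c2, nf2⟩ := hd2
                rw [show pvLoopA k (f + 1) ((v, c) :: rest) ((c2, nf2) :: ctl) out =
                  (if ((((c2, nf2) :: ctl ++ [(c, v + 1)]).length : Nat) : Int) = k then
                    (if 0 < -nf2 then
                      pvLoopA k f (pvHeapInsert (nf2, c2) rest) (ctl ++ [(c, v + 1)]) (out ++ [c])
                    else pvLoopA k f rest (ctl ++ [(c, v + 1)]) (out ++ [c]))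
                  else pvLoopA k f rest ((c2, nf2) :: ctl ++ [(c, v + 1)]) (out ++ [c])) from rfl]
                rw [if_pos hrel]
                have hinv' := pv_step_inv_release k i v c c2 nf2 rest ctl counts last inv hrel
                by_cases hpush : 0 < -nf2
                · rw [if_pos hpush]
                  rw [if_pos hpush] at hinv'
                  rw [ih (i + 1) _ _ _ _ (out ++ [c]) hinv']
                · rw [if_neg hpush]
                  rw [if_neg hpush] at hinv'
                  rw [ih (i + 1) _ _ _ _ (out ++ [c]) hinv']
          · rw [show pvLoopA k (f + 1) ((v, c) :: rest) cant out =
              (if (((cant ++ [(c, v + 1)]).length : Nat) : Int) = k then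
                (match cant ++ [(c, v + 1)] with
                  | [] => out ++ [c]
                  | (c2, nf2) :: crest =>
                      if 0 < -nf2 then
                        pvLoopA k f (pvHeapInsert (nf2, c2) rest) crest (out ++ [c])
                      else pvLoopA k f rest crest (out ++ [c]))
              else pvLoopA k f rest (cant ++ [(c, v + 1)]) (out ++ [c])) from rfl]
            rw [if_neg hrel]
            have hinv' := pv_step_inv_norelease k i v c rest cant counts last inv hrel
            rw [ih (i + 1) _ _ _ _ (out ++ [c]) hinv']

-- building A's heap from the frequency dict yields a sorted list holding exactly
-- one entry (-freq, char) per distinct character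
lemma pv_build_aux :
    ∀ (l : List (Char × Int)) (h : List (Int × Char)),
      h.Pairwise pvHeapLt → (∀ p ∈ l, ∀ z ∈ h, z.2 ≠ p.1) → (l.map Prod.fst).Nodup →
      (l.foldl (fun h p => pvHeapInsert (-p.2, p.1) h) h).Pairwise pvHeapLt ∧
      (∀ z, z ∈ l.foldl (fun h p => pvHeapInsert (-p.2, p.1) h) h ↔
        z ∈ h ∨ ∃ p ∈ l, z = (-p.2, p.1)) := by
  intro l
  induction l with
  | nil => intro h hp _ _; exact ⟨hp, by simp⟩
  | cons p0 l ih =>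
      intro h hp hdisj hnodup
      rw [List.foldl_cons]
      have hx : ∀ y ∈ h, ((-p0.2 : Int), p0.1) ≠ y := by
        intro y hy hc
        exact hdisj p0 List.mem_cons_self y hy (by rw [← hc])
      have hp' := pairwise_pvHeapInsert _ h hp hx
      have hdisj' : ∀ p ∈ l, ∀ z ∈ pvHeapInsert (-p0.2, p0.1) h, z.2 ≠ p.1 := by
        intro p hpl z hz
        rcases (mem_pvHeapInsert _ _ _).mp hz with he | hzh
        · rw [he]
          simp only []
          intro hc
          rw [List.map_cons, List.nodup_cons] at hnodup
          exact hnodup.1 (hc ▸ List.mem_map.mpr ⟨p, hpl, rfl⟩)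
        · exact hdisj p (List.mem_cons_of_mem _ hpl) z hzh
      have hnodup' : (l.map Prod.fst).Nodup := by
        rw [List.map_cons, List.nodup_cons] at hnodup
        exact hnodup.2
      obtain ⟨h1, h2⟩ := ih (pvHeapInsert (-p0.2, p0.1) h) hp' hdisj' hnodup'
      refine ⟨h1, fun z => ?_⟩
      rw [h2 z, mem_pvHeapInsert]
      constructor
      · rintro ((he | hzh) | ⟨p, hpl, he⟩)
        · exact Or.inr ⟨p0, List.mem_cons_self, he⟩
        · exact Or.inl hzh
        · exact Or.inr ⟨p, List.mem_cons_of_mem _ hpl, he⟩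
      · rintro (hzh | ⟨p, hpl, he⟩)
        · exact Or.inl (Or.inr hzh)
        · rcases List.mem_cons.mp hpl with hpe | hpl'
          · exact Or.inl (Or.inl (by rw [hpe] at he; exact he))
          · exact Or.inr ⟨p, hpl', he⟩

-- the initial states of the two loops satisfy the invariant
lemma pv_init_inv (k : Int) (hk : 2 ≤ k) (chars : List Char) :
    PvInv k 0
      ((PySem.Dict.counter chars : PySem.Dict Char Int).items.foldl
        (fun h p => pvHeapInsert (-p.2, p.1) h) [])
      [] (PySem.Dict.counter chars) PySem.Dict.empty := by
  have hnodup : (((PySem.Dict.counter chars : PySem.Dict Char Int).items.map Prod.fst)).Nodup := by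
    rw [PySem.Dict.items_counter, List.map_map]
    have h1 : (Prod.fst ∘ fun k : Char => (k, (List.count k chars : Int))) = id := rfl
    rw [h1, List.map_id]
    exact PySem.Set.nodup_ofList chars
  obtain ⟨hsort0, hmem0⟩ := pv_build_aux
    (PySem.Dict.counter chars : PySem.Dict Char Int).items [] List.Pairwise.nil (by simp) hnodup
  refine ⟨hk, le_refl 0, PySem.Dict.nodup_keys_counter chars, by simp; omega, ?_, ?_, ?_, hsort0, ?_⟩
  · intro j hj
    simp at hj
  · intro x hx
    rw [PySem.Dict.getD_empty] at hx
    omega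
  · intro p hp
    simp at hp
  · intro w x
    rw [hmem0 (w, x)]
    simp only [List.not_mem_nil, false_or]
    rw [PySem.Dict.items_counter]
    rw [PySem.Dict.getD_empty, PySem.Dict.getD_counter]
    constructor
    · rintro ⟨p, hp, he⟩
      obtain ⟨c0, hc0, rfl⟩ := List.mem_map.mp hp
      simp only [] at he
      have hx0 : x = c0 := congrArg Prod.snd he
      have hw0 : w = -(List.count c0 chars : Int) := congrArg Prod.fst he
      subst hx0
      have hcmem : x ∈ chars := (PySem.Set.mem_ofList chars x).mp hc0
      have hcpos : 0 < List.count x chars := List.count_pos_iff.mpr hcmem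
      refine ⟨by exact_mod_cast hcpos, by omega, by exact_mod_cast hw0⟩
    · rintro ⟨h1, _, h3⟩
      have hcpos : 0 < List.count x chars := by exact_mod_cast h1
      have hcmem : x ∈ chars := List.count_pos_iff.mp hcpos
      refine ⟨(x, (List.count x chars : Int)), ?_, ?_⟩
      · exact List.mem_map.mpr ⟨x, (PySem.Set.mem_ofList chars x).mpr hcmem, rfl⟩
      · rw [Prod.ext_iff]
        exact ⟨by omega, rfl⟩

-- ===== VERDICT (by name: the statement is the Claim_ definition above) =====
theorem rearrange_string_k_distance_apart_spec : Claim_equal_rearrange_string_k_distance_apart := by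
  intro string k _
  unfold Spec_rearrange_string_k_distance_apart
  unfold rearrange_string_k_distance_apart rearrange_string_k_distance_apart_alt
  by_cases hk : k ≤ 1
  · simp only [if_pos hk]
  · simp only [if_neg hk]
    rw [PySem.Dict.foldl_insert_getD_add_one_eq_counter]
    rw [pv_loop_sim k string.toList.length 0 _ [] _ _ []
      (pv_init_inv k (by omega) string.toList)]
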